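-- pv_equiv track=rewrite | github.com/HanyaKhan/AI-Doctor | ImprovedPrototype(without GUI)./file1.py | suggest_doctor
-- ===== SOURCE A (Python) =====
-- doctor_profiles = {
--     'Dr. Amarpreet Singh Riar': ['fever', 'stomach_pain', 'body_ache', 'throat_infection', 'typhoid', 'hives', 'swelling', 'cold', 'infectious_disease', 'diabetes', 'type_2_diabetes', 'stress'],
--     'Dr. (Maj.) Sharad Shrivastava': ['diabetes', 'chest_pain', 'asthma', 'thyroid', 'cough', 'pneumothorax', 'heatstroke'],
--     'Dr. Anirban Biswas': ['chest_pain', 'typhoid', 'stomach_pain', 'type_1_diabetes'],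
--     'Dr. Aman Vij': ['fever', 'viral_fever', 'blood_pressure', 'chickenpox', 'thyroid', 'anemia', 'dizziness', 'stomach_pain'],
--     'Dr. Mansi Arya': ['stress', 'skin_disease', 'mental_health']
-- }
--
-- def suggest_doctor(predicted_disease, user_symptoms):
--     predicted_disease_lower = predicted_disease.lower().replace(" ", "_")
--     best_match = None
--     max_overlap = 0
--
--     for doctor, symptoms in doctor_profiles.items():
--         overlap = len(set(symptoms).intersection(user_symptoms + [predicted_disease_lower]))
--         if overlap > max_overlap:
--             max_overlap = overlap
--             best_match = doctor
--
--     return best_match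
-- ===== SOURCE B (Python) =====
-- doctor_profiles = {
--     'Dr. Amarpreet Singh Riar': ['fever', 'stomach_pain', 'body_ache', 'throat_infection', 'typhoid', 'hives', 'swelling', 'cold', 'infectious_disease', 'diabetes', 'type_2_diabetes', 'stress'],
--     'Dr. (Maj.) Sharad Shrivastava': ['diabetes', 'chest_pain', 'asthma', 'thyroid', 'cough', 'pneumothorax', 'heatstroke'],
--     'Dr. Anirban Biswas': ['chest_pain', 'typhoid', 'stomach_pain', 'type_1_diabetes'],
--     'Dr. Aman Vij': ['fever', 'viral_fever', 'blood_pressure', 'chickenpox', 'thyroid', 'anemia', 'dizziness', 'stomach_pain'],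
--     'Dr. Mansi Arya': ['stress', 'skin_disease', 'mental_health']
-- }
--
-- def suggest_doctor(predicted_disease, user_symptoms):
--     predicted_disease_lower = predicted_disease.lower().replace(" ", "_")
--     # inverted index: symptom -> doctors whose profile lists it
--     index = {}
--     for doctor, symptoms in doctor_profiles.items():
--         for s in symptoms:
--             index.setdefault(s, []).append(doctor)
--     # tally each doctor once per distinct query symptom via the index
--     counts = {}
--     for s in set(user_symptoms + [predicted_disease_lower]):
--         for doctor in index.get(s, []):
--             counts[doctor] = counts.get(doctor, 0) + 1
--     best, best_count = None, 0
--     for doctor in doctor_profiles: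
--         c = counts.get(doctor, 0)
--         if c > best_count:
--             best, best_count = doctor, c
--     return best
-- ===== Notes on version B (the rewrite author's own statement) =====
-- stated objective: alternative
-- what changed: Replaces the per-doctor set-intersection scan with an inverted index (symptom -> doctors) built once, tallying doctor counts over the deduplicated query set and then picking the first doctor whose tally beats the running maximum.
import Mathlib
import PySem

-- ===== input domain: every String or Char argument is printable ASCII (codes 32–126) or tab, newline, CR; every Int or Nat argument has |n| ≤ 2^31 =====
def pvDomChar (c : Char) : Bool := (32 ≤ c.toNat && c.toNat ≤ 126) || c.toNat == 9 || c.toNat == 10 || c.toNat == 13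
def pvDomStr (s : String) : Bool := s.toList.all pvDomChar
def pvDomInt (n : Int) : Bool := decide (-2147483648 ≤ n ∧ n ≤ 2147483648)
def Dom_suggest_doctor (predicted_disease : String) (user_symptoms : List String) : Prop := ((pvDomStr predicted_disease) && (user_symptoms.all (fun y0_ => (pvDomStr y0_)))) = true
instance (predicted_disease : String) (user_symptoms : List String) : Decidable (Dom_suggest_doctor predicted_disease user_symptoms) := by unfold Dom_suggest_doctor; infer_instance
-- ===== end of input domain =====

-- B replaces the per-doctor set-intersection scan by an inverted index (symptom -> doctors)
-- tallied over the deduplicated query set; objective: alternative algorithm, same results.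

def doctor_profiles : List (String × List String) := [
  ("Dr. Amarpreet Singh Riar", ["fever", "stomach_pain", "body_ache", "throat_infection", "typhoid", "hives", "swelling", "cold", "infectious_disease", "diabetes", "type_2_diabetes", "stress"]),
  ("Dr. (Maj.) Sharad Shrivastava", ["diabetes", "chest_pain", "asthma", "thyroid", "cough", "pneumothorax", "heatstroke"]),
  ("Dr. Anirban Biswas", ["chest_pain", "typhoid", "stomach_pain", "type_1_diabetes"]),
  ("Dr. Aman Vij", ["fever", "viral_fever", "blood_pressure", "chickenpox", "thyroid", "anemia", "dizziness", "stomach_pain"]),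
  ("Dr. Mansi Arya", ["stress", "skin_disease", "mental_health"])]

-- ===== PORT A =====
def suggest_doctor (predicted_disease : String) (user_symptoms : List String) : Option String :=
  let predicted_disease_lower := PySem.Str.replace (PySem.Str.lower predicted_disease) " " "_"
  let st := doctor_profiles.foldl (fun (st : Option String × Int) dp =>
      let overlap : Int := ((PySem.Set.inter (PySem.Set.ofList dp.2) (user_symptoms ++ [predicted_disease_lower])).length : Int)
      if overlap > st.2 then (some dp.1, overlap) else st) (none, 0)
  st.1

-- ===== PORT B =====
def suggest_doctor_alt (predicted_disease : String) (user_symptoms : List String) : Option String :=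
  let predicted_disease_lower := PySem.Str.replace (PySem.Str.lower predicted_disease) " " "_"
  let index : PySem.Dict String (List String) :=
    doctor_profiles.foldl (fun idx dp =>
      dp.2.foldl (fun idx s => (idx.setdefault s []).modify s [] (fun l => l ++ [dp.1])) idx) PySem.Dict.empty
  let counts : PySem.Dict String Int :=
    (PySem.Set.ofList (user_symptoms ++ [predicted_disease_lower])).foldl (fun cs s =>
      (index.getD s []).foldl (fun (cs : PySem.Dict String Int) d => cs.insert d (cs.getD d 0 + 1)) cs) PySem.Dict.empty
  let st := doctor_profiles.foldl (fun (st : Option String × Int) dp =>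
      let c := counts.getD dp.1 0
      if c > st.2 then (some dp.1, c) else st) (none, 0)
  st.1

-- ===== PRECONDITION & SPEC =====
def Spec_suggest_doctor (predicted_disease : String) (user_symptoms : List String) (out : Option String) : Prop := out = suggest_doctor_alt predicted_disease user_symptoms
instance (predicted_disease : String) (user_symptoms : List String) (out : Option String) : Decidable (Spec_suggest_doctor predicted_disease user_symptoms out) := by unfold Spec_suggest_doctor; infer_instance

-- ===== CLAIM (what is proved, stated in full; the proofs are below) =====
def Claim_equal_suggest_doctor : Prop := ∀ (predicted_disease : String) (user_symptoms : List String), Dom_suggest_doctor predicted_disease user_symptoms → Spec_suggest_doctor predicted_disease user_symptoms (suggest_doctor predicted_disease user_symptoms)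

-- ===== LEMMAS AND PROOFS =====

-- ===== VERDICT is at the bottom; proof helpers follow =====
def pvIdxItems : List (String × List String) := [("fever", ["Dr. Amarpreet Singh Riar", "Dr. Aman Vij"]), ("stomach_pain", ["Dr. Amarpreet Singh Riar", "Dr. Anirban Biswas", "Dr. Aman Vij"]), ("body_ache", ["Dr. Amarpreet Singh Riar"]), ("throat_infection", ["Dr. Amarpreet Singh Riar"]), ("typhoid", ["Dr. Amarpreet Singh Riar", "Dr. Anirban Biswas"]), ("hives", ["Dr. Amarpreet Singh Riar"]), ("swelling", ["Dr. Amarpreet Singh Riar"]), ("cold", ["Dr. Amarpreet Singh Riar"]), ("infectious_disease", ["Dr. Amarpreet Singh Riar"]), ("diabetes", ["Dr. Amarpreet Singh Riar", "Dr. (Maj.) Sharad Shrivastava"]), ("type_2_diabetes", ["Dr. Amarpreet Singh Riar"]), ("stress", ["Dr. Amarpreet Singh Riar", "Dr. Mansi Arya"]), ("chest_pain", ["Dr. (Maj.) Sharad Shrivastava", "Dr. Anirban Biswas"]), ("asthma", ["Dr. (Maj.) Sharad Shrivastava"]), ("thyroid", ["Dr. (Maj.) Sharad Shrivastava", "Dr.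 Aman Vij"]), ("cough", ["Dr. (Maj.) Sharad Shrivastava"]), ("pneumothorax", ["Dr. (Maj.) Sharad Shrivastava"]), ("heatstroke", ["Dr. (Maj.) Sharad Shrivastava"]), ("type_1_diabetes", ["Dr. Anirban Biswas"]), ("viral_fever", ["Dr. Aman Vij"]), ("blood_pressure", ["Dr. Aman Vij"]), ("chickenpox", ["Dr. Aman Vij"]), ("anemia", ["Dr. Aman Vij"]), ("dizziness", ["Dr. Aman Vij"]), ("skin_disease", ["Dr. Mansi Arya"]), ("mental_health", ["Dr. Mansi Arya"])]

set_option maxRecDepth 4096 in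
theorem pvIdx_eq :
    doctor_profiles.foldl (fun idx dp =>
      dp.2.foldl (fun idx s => (PySem.Dict.setdefault idx s []).modify s [] (fun l => l ++ [dp.1])) idx) PySem.Dict.empty
    = PySem.Dict.mk pvIdxItems := by decide

def pvLookup : List (String × List String) → String → List String
  | [], _ => []
  | (k, v) :: rest, s => if k == s then v else pvLookup rest s

theorem getD_mk_eq_pvLookup (items : List (String × List String)) (s : String) :
    (PySem.Dict.mk items).getD s [] = pvLookup items s := by
  induction items with
  | nil => rfl
  | cons p rest ih =>
      obtain ⟨k, v⟩ := p
      rw [PySem.Dict.getD_eq_get?_getD, PySem.Dict.get?_mk_cons, pvLookup]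
      by_cases h : (k == s) = true
      · simp [h]
      · rw [if_neg h, if_neg h, ← PySem.Dict.getD_eq_get?_getD]
        exact ih

theorem count_lookup_of (d s : String) (L : List String) :
    ∀ (items : List (String × List String)),
      (∀ p ∈ items, p.2.count d = if p.1 ∈ L then 1 else 0) →
      (s ∈ L → s ∈ items.map (·.1)) →
      (pvLookup items s).count d = if s ∈ L then 1 else 0 := by
  intro items
  induction items with
  | nil =>
      intro _ h2
      rw [pvLookup, if_neg (fun hs => by simpa using h2 hs)]
      rfl
  | cons p rest ih =>
      intro h1 h2
      rw [pvLookup.eq_def]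
      obtain ⟨k, v⟩ := p
      by_cases h : (k == s) = true
      · simp only [h, if_true]
        have hk := h1 (k, v) (by simp)
        rwa [eq_of_beq h] at hk
      · simp only [h]
        exact ih (fun q hq => h1 q (by simp [hq])) (fun hs => by
          have := h2 hs
          simp only [List.map_cons, List.mem_cons] at this
          rcases this with heq | hmem
          · exact absurd (by subst heq; exact beq_self_eq_true s) h
          · exact hmem)

theorem tally_getD (g : String → List String) (S : List String) (cs : PySem.Dict String Int) (d : String) :
    (S.foldl (fun cs s => (g s).foldl (fun (cs : PySem.Dict String Int) d' => cs.insert d' (cs.getD d' 0 + 1)) cs) cs).getD d 0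
    = cs.getD d 0 + ((S.map (fun s => ((g s).count d : Int))).sum) := by
  induction S generalizing cs with
  | nil => simp
  | cons s S ih => simp [List.foldl, ih, PySem.Dict.getD_foldl_insert_add_one]; ring

theorem sum_indicator (S L : List String) :
    (S.map (fun s => (((if s ∈ L then 1 else 0 : Nat)) : Int))).sum
    = ((S.filter (fun s => decide (s ∈ L))).length : Int) := by
  induction S with
  | nil => rfl
  | cons s S ih =>
      by_cases h : s ∈ L <;>
        simp only [List.map_cons, List.sum_cons, List.filter_cons, h, decide_true, decide_false,
          if_true, if_false, List.length_cons, ih] <;>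
        push_cast <;> ring

theorem filter_mem_length_comm (l1 l2 : List String) (h1 : l1.Nodup) (h2 : l2.Nodup) :
    (l1.filter (fun x => decide (x ∈ l2))).length = (l2.filter (fun x => decide (x ∈ l1))).length := by
  have e1 : (l1.filter (fun x => decide (x ∈ l2))).toFinset = l1.toFinset ∩ l2.toFinset := by
    ext x; simp
  have e2 : (l2.filter (fun x => decide (x ∈ l1))).toFinset = l2.toFinset ∩ l1.toFinset := by
    ext x; simp
  have c1 := List.toFinset_card_of_nodup (h1.filter (fun x => decide (x ∈ l2)))
  have c2 := List.toFinset_card_of_nodup (h2.filter (fun x => decide (x ∈ l1)))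
  rw [← c1, ← c2, e1, e2, Finset.inter_comm]

theorem foldl_select_congr (fA fB : String × List String → Int)
    (l : List (String × List String)) (h : ∀ dp ∈ l, fA dp = fB dp) (st : Option String × Int) :
    l.foldl (fun st dp => if fA dp > st.2 then (some dp.1, fA dp) else st) st
    = l.foldl (fun st dp => if fB dp > st.2 then (some dp.1, fB dp) else st) st := by
  induction l generalizing st with
  | nil => rfl
  | cons dp l ih =>
      rw [List.foldl_cons, List.foldl_cons, h dp (by simp)]
      exact ih (fun q hq => h q (by simp [hq])) _

theorem per_doctor (name : String) (L : List String) (hnd : L.Nodup)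
    (hcnt : ∀ s, (pvLookup pvIdxItems s).count name = if s ∈ L then 1 else 0)
    (q : List String) :
    ((PySem.Set.ofList q).foldl (fun cs s =>
        ((PySem.Dict.mk pvIdxItems).getD s []).foldl
          (fun (cs : PySem.Dict String Int) d => cs.insert d (cs.getD d 0 + 1)) cs)
        PySem.Dict.empty).getD name 0
    = ((PySem.Set.inter (PySem.Set.ofList L) q).length : Int) := by
  rw [tally_getD]
  simp only [PySem.Dict.getD_empty, getD_mk_eq_pvLookup, hcnt, zero_add]
  rw [sum_indicator]
  have h1 : PySem.Set.inter (PySem.Set.ofList L) q = L.filter (fun x => decide (x ∈ PySem.Set.ofList q)) := by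
    rw [PySem.Set.ofList_eq_self_of_nodup L hnd]
    show L.filter (fun x => PySem.Set.contains q x) = _
    congr 1
    funext x
    by_cases hx : x ∈ q <;> simp [hx, PySem.Set.mem_ofList]
  rw [h1, filter_mem_length_comm L (PySem.Set.ofList q) hnd (PySem.Set.nodup_ofList q)]

theorem main_eq (pd : String) (us : List String) : suggest_doctor pd us = suggest_doctor_alt pd us := by
  unfold suggest_doctor suggest_doctor_alt
  simp only [pvIdx_eq]
  exact congrArg Prod.fst (foldl_select_congr _ _ doctor_profiles (by
    intro dp hdp
    fin_cases hdp <;>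
      exact (per_doctor _ _ (by decide)
        (fun s => count_lookup_of _ s _ pvIdxItems (by decide)
          (fun hs => by fin_cases hs <;> decide)) _).symm) (none, 0))

-- ===== VERDICT (by name: the statement is the Claim_ definition above) =====
theorem suggest_doctor_spec : Claim_equal_suggest_doctor := by
  intro pd us _
  unfold Spec_suggest_doctor
  exact main_eq pd us
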